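-- pv_equiv track=rewrite | github.com/Maxilef/cryptanalyse-cesar-vigenere | vigenere.py | recolle
-- ===== SOURCE A (Python) =====
-- def recolle(sous_chaines):
--     """
--     permet de recolé aprés un fractionnement des sous chaine
--     """
--
--     # on prend la longeur de la sous chaine la plus grande
--     longueur_max = 0
--     for sous_chaine in sous_chaines:
--         longueur_max = max(longueur_max, len(sous_chaine))
--
--     chaine_recollee = ""
--     for i in range(longueur_max):
--         for chaine in sous_chaines:
--             if i < len(chaine):
--                 chaine_recollee += chaine[i]
--
--     return chaine_recollee
-- ===== SOURCE B (Python) =====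
-- def recolle(sous_chaines):
--     """
--     permet de recolé aprés un fractionnement des sous chaine
--     """
--     morceaux = []
--     restes = list(sous_chaines)
--     while any(restes):
--         morceaux.append(''.join(s[0] for s in restes if s))
--         restes = [s[1:] for s in restes]
--     return ''.join(morceaux)
-- ===== Notes on version B (the rewrite author's own statement) =====
-- stated objective: alternative
-- what changed: B builds the result column-by-column by repeatedly peeling the first character off every non-empty substring (a zip_longest-style transpose), instead of computing the maximal length and indexing every string with a bounds check for each position.
import Mathlib
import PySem

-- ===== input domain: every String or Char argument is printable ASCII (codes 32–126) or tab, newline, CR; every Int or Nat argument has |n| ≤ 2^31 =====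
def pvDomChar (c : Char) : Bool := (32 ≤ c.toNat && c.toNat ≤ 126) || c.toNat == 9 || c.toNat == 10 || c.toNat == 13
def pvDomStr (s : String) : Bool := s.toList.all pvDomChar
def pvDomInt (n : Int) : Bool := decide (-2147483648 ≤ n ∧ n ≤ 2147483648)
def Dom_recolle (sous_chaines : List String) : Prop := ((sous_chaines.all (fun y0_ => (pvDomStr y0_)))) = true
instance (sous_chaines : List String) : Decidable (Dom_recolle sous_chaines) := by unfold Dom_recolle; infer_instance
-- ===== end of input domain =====

-- B interleaves by repeatedly peeling the head character off every non-empty substring, instead of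
-- indexing each string up to the precomputed maximal length with a bounds check (objective: alternative).
-- Both programs are total; strings are handled as their character lists (indexing is exact: A only
-- indexes chaine[i] with 0 ≤ i < len(chaine)).

-- ===== PORT A =====
-- inner loop of A: for chaine in sous_chaines: if i < len(chaine): chaine_recollee += chaine[i]
def recolleCol (ls : List (List Char)) (i : Nat) (acc : List Char) : List Char :=
  ls.foldl (fun acc c => if i < c.length then acc ++ [c.getD i ' '] else acc) acc

def recolle (sous_chaines : List String) : String :=
  String.ofList ((List.range ((sous_chaines.map String.toList).foldl (fun m s => max m s.length) 0)).foldl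
    (fun acc i => recolleCol (sous_chaines.map String.toList) i acc) [])

-- ===== PORT B =====
theorem pv_sum_tail_le (ls : List (List Char)) :
    ((ls.map List.tail).map List.length).sum ≤ (ls.map List.length).sum := by
  induction ls with
  | nil => simp
  | cons c t ih =>
    simp only [List.map_cons, List.sum_cons]
    have : c.tail.length ≤ c.length := by cases c <;> simp
    omega

theorem pv_sum_tail_lt (ls : List (List Char)) (h : ¬ (ls.all List.isEmpty = true)) :
    ((ls.map List.tail).map List.length).sum < (ls.map List.length).sum := by
  induction ls with
  | nil => simp at h
  | cons c t ih =>
    simp only [List.map_cons, List.sum_cons]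
    by_cases hc : c.isEmpty = true
    · have ht : ¬ (t.all List.isEmpty = true) := by
        intro ht; exact h (by simp [List.all_cons, hc, ht])
      have := ih ht
      have : c.tail.length ≤ c.length := by cases c <;> simp
      omega
    · have h1 : c.tail.length < c.length := by
        cases c with
        | nil => simp at hc
        | cons a r => simp
      have := pv_sum_tail_le t
      omega

-- while any(restes): append the head of every non-empty string; restes = [s[1:] for s in restes]
def recolleGo (ls : List (List Char)) : List Char :=
  if h : ls.all List.isEmpty = true then []
  else ls.filterMap List.head? ++ recolleGo (ls.map List.tail)
termination_by (ls.map List.length).sum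
decreasing_by simpa using pv_sum_tail_lt ls h

def recolle_alt (sous_chaines : List String) : String :=
  String.ofList (recolleGo (sous_chaines.map String.toList))

-- ===== PRECONDITION & SPEC =====
def Spec_recolle (sous_chaines : List String) (out : String) : Prop := out = recolle_alt sous_chaines
instance (sous_chaines : List String) (out : String) : Decidable (Spec_recolle sous_chaines out) := by unfold Spec_recolle; infer_instance

-- ===== CLAIM (what is proved, stated in full; the proofs are below) =====
def Claim_equal_recolle : Prop := ∀ (sous_chaines : List String), Dom_recolle sous_chaines → Spec_recolle sous_chaines (recolle sous_chaines)

-- ===== LEMMAS AND PROOFS =====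

-- one column, in flatMap form
def pvColF (ls : List (List Char)) (i : Nat) : List Char :=
  ls.flatMap (fun c => if i < c.length then [c.getD i ' '] else [])

-- the foldr-max of the lengths
def pvM (ls : List (List Char)) : Nat := (ls.map List.length).foldr max 0

theorem pv_col_acc (ls : List (List Char)) (i : Nat) :
    ∀ acc, recolleCol ls i acc = acc ++ pvColF ls i := by
  induction ls with
  | nil => intro acc; simp [recolleCol, pvColF]
  | cons c t ih =>
    intro acc
    simp only [recolleCol, pvColF, List.foldl_cons, List.flatMap_cons]
    by_cases h : i < c.length
    · simp only [if_pos h]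
      rw [show (t.foldl (fun acc c => if i < c.length then acc ++ [c.getD i ' '] else acc)
          (acc ++ [c.getD i ' '])) = recolleCol t i (acc ++ [c.getD i ' ']) from rfl, ih]
      simp [pvColF]
    · simp only [if_neg h]
      rw [show (t.foldl (fun acc c => if i < c.length then acc ++ [c.getD i ' '] else acc) acc)
          = recolleCol t i acc from rfl, ih]
      simp [pvColF]

theorem pv_foldl_append {α β : Type} (f : α → List β) :
    ∀ (l : List α) (acc : List β),
      l.foldl (fun a x => a ++ f x) acc = acc ++ l.flatMap f := by
  intro l
  induction l with
  | nil => intro acc; simp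
  | cons x t ih => intro acc; simp [List.foldl_cons, ih]

theorem pv_foldl_max (ls : List (List Char)) :
    ∀ a, ls.foldl (fun m s => max m s.length) a = max a (pvM ls) := by
  induction ls with
  | nil => intro a; simp [pvM]
  | cons c t ih =>
    intro a
    simp only [List.foldl_cons, ih, pvM, List.map_cons, List.foldr_cons]
    have : pvM t = (t.map List.length).foldr max 0 := rfl
    omega

theorem pv_M_tail (ls : List (List Char)) : pvM (ls.map List.tail) = pvM ls - 1 := by
  induction ls with
  | nil => simp [pvM]
  | cons c t ih =>
    simp only [pvM, List.map_cons, List.foldr_cons] at *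
    have hc : c.tail.length = c.length - 1 := by cases c <;> simp
    omega

theorem pv_M_pos (ls : List (List Char)) (h : ¬ (ls.all List.isEmpty = true)) : 0 < pvM ls := by
  induction ls with
  | nil => simp at h
  | cons c t ih =>
    simp only [pvM, List.map_cons, List.foldr_cons]
    by_cases hc : c.isEmpty = true
    · have ht : ¬ (t.all List.isEmpty = true) := by
        intro ht; exact h (by simp [List.all_cons, hc, ht])
      have := ih ht
      simp only [pvM] at this
      omega
    · have : 0 < c.length := by cases c with | nil => simp at hc | cons a r => simp
      omega

theorem pv_M_zero (ls : List (List Char)) (h : ls.all List.isEmpty = true) : pvM ls = 0 := by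
  induction ls with
  | nil => simp [pvM]
  | cons c t ih =>
    simp only [List.all_cons, Bool.and_eq_true] at h
    have hc : c.length = 0 := by
      cases c with | nil => rfl | cons a r => simp at h
    have := ih h.2
    simp only [pvM, List.map_cons, List.foldr_cons] at *
    omega

theorem pv_col_succ (ls : List (List Char)) (i : Nat) :
    pvColF (ls.map List.tail) i = pvColF ls (i + 1) := by
  induction ls with
  | nil => simp [pvColF]
  | cons c t ih =>
    simp only [pvColF, List.map_cons, List.flatMap_cons] at *
    rw [ih]
    congr 1
    cases c with
    | nil => simp
    | cons a r => simp

theorem pv_col_zero (ls : List (List Char)) : ls.filterMap List.head? = pvColF ls 0 := by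
  induction ls with
  | nil => simp [pvColF]
  | cons c t ih =>
    cases c with
    | nil => simpa [pvColF] using ih
    | cons a r => simpa [pvColF] using ih

theorem pv_range_flatMap_succ (n : Nat) (f : Nat → List Char) :
    (List.range (n + 1)).flatMap f = f 0 ++ (List.range n).flatMap (fun i => f (i + 1)) := by
  rw [List.range_succ_eq_map]
  simp [List.flatMap_map]

theorem pv_go_eq_aux (n : Nat) : ∀ (ls : List (List Char)), (ls.map List.length).sum ≤ n →
    recolleGo ls = (List.range (pvM ls)).flatMap (pvColF ls) := by
  induction n with
  | zero =>
    intro ls hn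
    have h : ls.all List.isEmpty = true := by
      rw [List.all_eq_true]
      intro c hc
      have : c.length = 0 := by
        have : c.length ≤ (ls.map List.length).sum := List.le_sum_of_mem (List.mem_map_of_mem hc)
        omega
      cases c with | nil => rfl | cons a r => simp at this
    rw [recolleGo, dif_pos h, pv_M_zero ls h]
    simp
  | succ n ih =>
    intro ls hn
    by_cases h : ls.all List.isEmpty = true
    · rw [recolleGo, dif_pos h, pv_M_zero ls h]; simp
    · have hlt := pv_sum_tail_lt ls h
      have ihl := ih (ls.map List.tail) (by omega)
      rw [recolleGo, dif_neg h, ihl, pv_M_tail]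
      have hpos := pv_M_pos ls h
      have hM : pvM ls = (pvM ls - 1) + 1 := by omega
      rw [pv_col_zero, show (List.range (pvM ls)).flatMap (pvColF ls)
          = (List.range ((pvM ls - 1) + 1)).flatMap (pvColF ls) from by rw [← hM],
        pv_range_flatMap_succ]
      congr 1
      apply List.flatMap_congr  -- pointwise equality of columns
      intro i _
      exact pv_col_succ ls i

theorem pv_go_eq (ls : List (List Char)) :
    recolleGo ls = (List.range (pvM ls)).flatMap (pvColF ls) :=
  pv_go_eq_aux _ ls le_rfl

-- ===== VERDICT (by name: the statement is the Claim_ definition above) =====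
theorem recolle_spec : Claim_equal_recolle := by
  intro sous_chaines _
  unfold Spec_recolle recolle recolle_alt
  rw [pv_go_eq]
  congr 1
  rw [pv_foldl_max _ 0, Nat.max_eq_right (Nat.zero_le _)]
  have hinner : (fun (acc : List Char) (i : Nat) => recolleCol (sous_chaines.map String.toList) i acc)
      = fun acc i => acc ++ pvColF (sous_chaines.map String.toList) i := by
    funext acc i; exact pv_col_acc _ i acc
  rw [hinner, pv_foldl_append]
  simp
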